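-- pv_equiv track=rewrite | github.com/RedHorseVR/Parser_CPP | inoCommentParser.py | __fix_VFC_paths
-- ===== SOURCE A (Python) =====
-- VFCSEPERATOR = ';//'
--
-- def __fix_VFC_paths( input_string ):
-- 	strings = input_string.split("\n")
-- 	VFC = ''
-- 	skip_next = 0
-- 	for i  in range( len(strings) ) :
-- 		code = strings[i]
-- 		if code.startswith( "branch")  :
--
-- 			code2 = strings[i+1].strip()
-- 			code3 = strings[i+2].strip()
-- 			if code2.startswith("path()")   and   code3.startswith("set({)"):
--
-- 				VFC +=code + "\n"
-- 				VFC += "path({)" + VFCSEPERATOR  + '\n'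
-- 				skip_next = 3
--
--
-- 		if skip_next > 0:
--
-- 			skip_next -= 1
-- 			continue
--
-- 		VFC +=code + "\n"
--
--
-- 	return VFC
-- ===== SOURCE B (Python) =====
-- VFCSEPERATOR = ';//'
--
-- def __fix_VFC_paths(input_string):
--     strings = input_string.split("\n")
--     # Stage 1: mask of the lines that open a matched branch/path()/set({) triple,
--     # computed by zipping the line list against its two shifts.
--     padded = strings + ["", ""]
--     match = [a.startswith("branch")
--              and b.strip().startswith("path()")
--              and c.strip().startswith("set({)")
--              for a, b, c in zip(strings, padded[1:], padded[2:])]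
--     # Stage 2: a line is dropped iff one of the two previous lines is matched
--     # (masks cannot overlap: a matched line's two neighbours never start "branch").
--     kept = [not (m1 or m2)
--             for m1, m2, _ in zip([False] + match, [False, False] + match, strings)]
--     # Stage 3: emit kept lines, inserting the rewritten path line after each match.
--     lines = []
--     for code, m, k in zip(strings, match, kept):
--         if k:
--             lines.append(code + "\n")
--         if m:
--             lines.append("path({)" + VFCSEPERATOR + "\n")
--     return "".join(lines)
-- ===== Notes on version B (the rewrite author's own statement) =====
-- stated objective: alternative
-- what changed: Replaces A's single stateful pass (skip_next counter, growing string) by three staged mask passes: a zip-against-two-shifts pass computing a boolean match mask, a shifted-mask pass computing which lines are kept (correct because matches cannot overlap: a matched line's two neighbours never start with 'branch'), and an emit pass joined once; where A raises IndexError (a 'branch' line among the last two lines) B pads with two empty lines and returns normally.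
-- outside the precondition, e.g. on __fix_VFC_paths('branch'): A raises IndexError, B returns 'branch\n'
import Mathlib
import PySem

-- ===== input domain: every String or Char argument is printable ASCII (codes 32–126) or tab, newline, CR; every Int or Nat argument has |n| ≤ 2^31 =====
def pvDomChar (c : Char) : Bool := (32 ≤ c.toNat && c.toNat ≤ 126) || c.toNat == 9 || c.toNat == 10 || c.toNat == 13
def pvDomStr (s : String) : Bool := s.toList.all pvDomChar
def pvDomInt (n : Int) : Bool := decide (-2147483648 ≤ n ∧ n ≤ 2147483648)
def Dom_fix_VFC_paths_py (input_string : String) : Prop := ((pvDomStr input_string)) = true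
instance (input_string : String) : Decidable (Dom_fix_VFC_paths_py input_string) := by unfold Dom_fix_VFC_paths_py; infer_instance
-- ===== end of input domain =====

-- B replaces A's single stateful pass (skip_next counter, string concatenation) by
-- three staged passes: a zip-against-shifts pass computing a match mask, a shifted-mask
-- pass computing which lines are kept, and an emit pass joined once (objective: simpler).
-- Where A raises IndexError (a "branch" line among the last two split lines, excluded
-- by Pre_), B's empty-string padding makes it return the text unchanged there.

-- ===== PORT A =====
-- A's for-loop over range(len(strings)) with state (VFC, skip_next), as a
-- structural recursion over the line list in the same order with the same state;
-- strings[i+1]/strings[i+2] are the next two elements of the remaining list.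
-- Where Python raises IndexError (pyGet? = none, excluded by Pre_) we read "".
def fixA_go : List String → String → Int → String
  | [], vfc, _ => vfc
  | code :: rest, vfc, skip_next =>
    let (vfc', skip') :=
      if PySem.Str.startswith code "branch" then
        let code2 := PySem.Str.strip ((PySem.List.pyGet? rest 0).getD "")
        let code3 := PySem.Str.strip ((PySem.List.pyGet? rest 1).getD "")
        if PySem.Str.startswith code2 "path()" && PySem.Str.startswith code3 "set({)" then
          (vfc ++ code ++ "\n" ++ ("path({)" ++ ";//" ++ "\n"), (3 : Int))
        else (vfc, skip_next)
      else (vfc, skip_next)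
    if skip' > 0 then fixA_go rest vfc' (skip' - 1)
    else fixA_go rest (vfc' ++ code ++ "\n") skip'

def fix_VFC_paths_py (input_string : String) : String :=
  -- split? is none only for sep = ""; the separator is "\n", so getD never fires
  fixA_go ((PySem.Str.split? input_string "\n").getD []) "" 0

-- ===== PORT B =====
-- Stage 1 of Source B: the match mask, a map over the lines zipped with their two shifts
-- (padded[1:], padded[2:] are slices of strings + ["", ""]).
def bMatch (strings : List String) : List Bool :=
  let padded := strings ++ ["", ""]
  (List.zip strings (List.zip (PySem.List.slice padded (some 1) none)
      (PySem.List.slice padded (some 2) none))).map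
    (fun t => PySem.Str.startswith t.1 "branch"
      && PySem.Str.startswith (PySem.Str.strip t.2.1) "path()"
      && PySem.Str.startswith (PySem.Str.strip t.2.2) "set({)")

-- Stage 2 of Source B: kept mask from the match mask zipped with its shifts.
def bKept (mtch : List Bool) (strings : List String) : List Bool :=
  (List.zip ([false] ++ mtch) (List.zip ([false, false] ++ mtch) strings)).map
    (fun t => !(t.1 || t.2.1))

-- Stage 3 of Source B: the emit loop appending into `lines`, as a flatMap.
def bLines (strings : List String) (mtch kept : List Bool) : List String :=
  (List.zip strings (List.zip mtch kept)).flatMap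
    (fun t => (if t.2.2 then [t.1 ++ "\n"] else []) ++
      (if t.2.1 then ["path({)" ++ ";//" ++ "\n"] else []))

def fix_VFC_paths_py_alt (input_string : String) : String :=
  PySem.Str.join ""
    (bLines ((PySem.Str.split? input_string "\n").getD [])
      (bMatch ((PySem.Str.split? input_string "\n").getD []))
      (bKept (bMatch ((PySem.Str.split? input_string "\n").getD []))
        ((PySem.Str.split? input_string "\n").getD [])))

-- ===== PRECONDITION & SPEC =====
-- Pre_ excludes exactly the inputs on which Python A raises IndexError:
-- those whose split has a line starting with "branch" among its last two lines.
def Pre_fix_VFC_paths_py (input_string : String) : Prop :=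
  (((PySem.Str.split? input_string "\n").getD []).drop
      (((PySem.Str.split? input_string "\n").getD []).length - 2)).all
    (fun s => !(PySem.Str.startswith s "branch")) = true
instance (input_string : String) : Decidable (Pre_fix_VFC_paths_py input_string) := by
  unfold Pre_fix_VFC_paths_py; infer_instance
def pvWitness_fix_VFC_paths_py : String := "branch a\npath()\nset({) x\nend"

def Spec_fix_VFC_paths_py (input_string : String) (out : String) : Prop :=
  out = fix_VFC_paths_py_alt input_string
instance (input_string : String) (out : String) : Decidable (Spec_fix_VFC_paths_py input_string out) := by
  unfold Spec_fix_VFC_paths_py; infer_instance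

-- ===== CLAIM (what is proved, stated in full; the proofs are below) =====
def Claim_equal_fix_VFC_paths_py : Prop := ∀ (input_string : String), Dom_fix_VFC_paths_py input_string → Pre_fix_VFC_paths_py input_string → Spec_fix_VFC_paths_py input_string (fix_VFC_paths_py input_string)

-- ===== LEMMAS AND PROOFS =====

-- The common line-list recursion both ports are reduced to (proof helper only).
def fixGo : List String → List String
  | [] => []
  | code :: c2 :: c3 :: rest =>
    if PySem.Str.startswith code "branch"
        && PySem.Str.startswith (PySem.Str.strip c2) "path()"
        && PySem.Str.startswith (PySem.Str.strip c3) "set({)" then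
      (code ++ "\n") :: ("path({)" ++ ";//" ++ "\n") :: fixGo rest
    else
      (code ++ "\n") :: fixGo (c2 :: c3 :: rest)
  | code :: rest => (code ++ "\n") :: fixGo rest

lemma intercalate_nil_flatten (l : List (List Char)) : List.intercalate [] l = l.flatten := by
  induction l with
  | nil => rfl
  | cons x t ih =>
    cases t with
    | nil => simp [List.intercalate]
    | cons y u =>
      simp [List.intercalate] at ih ⊢
      simpa using ih

lemma join_empty_cons (x : String) (l : List String) :
    PySem.Str.join "" (x :: l) = x ++ PySem.Str.join "" l := by
  simp [PySem.Str.join, PySem.Chars.join, intercalate_nil_flatten]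

lemma rstrip_prefix (l : List Char) : PySem.Chars.rstrip l <+: l := by
  unfold PySem.Chars.rstrip
  obtain ⟨pre, hpre⟩ := List.dropWhile_suffix (l := l.reverse) PySem.Chars.isspace
  refine ⟨pre.reverse, ?_⟩
  have := congrArg List.reverse hpre
  simpa using this

lemma not_branch_of_strip (c p : String) (d : Char)
    (hd : p.toList.head? = some d) (hdb : d ≠ 'b')
    (h : PySem.Str.startswith (PySem.Str.strip c) p = true) :
    PySem.Str.startswith c "branch" = false := by
  by_contra hb
  rw [Bool.not_eq_false] at hb
  rw [PySem.Str.startswith_eq, PySem.Chars.startswith_iff] at h hb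
  rw [PySem.Str.toList_strip] at h
  obtain ⟨t, ht⟩ : ∃ t, c.toList = 'b' :: t := by
    obtain ⟨r, hr⟩ := hb
    exact ⟨_, hr.symm⟩
  rw [ht] at h
  have hstrip : PySem.Chars.strip ('b' :: t) <+: 'b' :: t := by
    unfold PySem.Chars.strip
    have hl : PySem.Chars.lstrip ('b' :: t) = 'b' :: t := by
      simp [PySem.Chars.lstrip, PySem.Chars.isspace]
    rw [hl]
    exact rstrip_prefix _
  have hp : p.toList <+: 'b' :: t := h.trans hstrip
  cases hq : p.toList with
  | nil => simp [hq] at hd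
  | cons d' q =>
    rw [hq] at hp hd
    obtain ⟨r, hr⟩ := hp
    simp at hr hd
    exact hdb (hd ▸ hr.1)

-- ==== A-side: fixA_go reduces to fixGo ====

lemma go_skip2 (c2 c3 : String) (rest : List String) (vfc : String)
    (hb2 : PySem.Str.startswith c2 "branch" = false)
    (hb3 : PySem.Str.startswith c3 "branch" = false) :
    fixA_go (c2 :: c3 :: rest) vfc 2 = fixA_go rest vfc 0 := by
  rw [fixA_go]
  simp only [hb2, Bool.false_eq_true, if_false]
  norm_num
  rw [fixA_go]
  simp only [hb3, Bool.false_eq_true, if_false]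
  norm_num

lemma go_eq (l : List String) (vfc : String) :
    fixA_go l vfc 0 = vfc ++ PySem.Str.join "" (fixGo l) := by
  induction l using fixGo.induct generalizing vfc
  case case1 =>
    simp [fixA_go, fixGo, PySem.Str.join, PySem.Chars.join, List.intercalate]
  case case2 code c2 c3 rest hc ih =>
    have hc' := hc
    simp only [Bool.and_eq_true] at hc'
    obtain ⟨⟨ha, hb⟩, hc3⟩ := hc'
    have hb2 : PySem.Str.startswith c2 "branch" = false :=
      not_branch_of_strip c2 "path()" 'p' (by decide) (by decide) hb
    have hb3 : PySem.Str.startswith c3 "branch" = false :=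
      not_branch_of_strip c3 "set({)" 's' (by decide) (by decide) hc3
    have g0 : (PySem.List.pyGet? (c2 :: c3 :: rest) 0).getD "" = c2 := by simp
    have g1 : (PySem.List.pyGet? (c2 :: c3 :: rest) 1).getD "" = c3 := by simp
    rw [fixA_go]
    simp only [ha, if_true, g0, g1, hb, hc3, Bool.and_self]
    norm_num only
    simp only [if_true]
    rw [go_skip2 c2 c3 rest _ hb2 hb3, ih]
    rw [fixGo]
    simp only [hc, if_true]
    rw [join_empty_cons, join_empty_cons]
    simp [String.append_assoc]
    rw [show ("\npath({);//\n" : String) = "\n" ++ "path({);//\n" from by decide,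
      String.append_assoc]
  case case3 code c2 c3 rest hc ih =>
    have g0 : (PySem.List.pyGet? (c2 :: c3 :: rest) 0).getD "" = c2 := by simp
    have g1 : (PySem.List.pyGet? (c2 :: c3 :: rest) 1).getD "" = c3 := by simp
    rw [fixA_go, fixGo]
    simp only [hc, Bool.false_eq_true, if_false, g0, g1]
    by_cases ha : PySem.Str.startswith code "branch" = true
    · have hbc := hc
      simp only [ha, Bool.true_and] at hbc
      simp only [ha, if_true, hbc, Bool.false_eq_true, if_false]
      norm_num only
      rw [ih, join_empty_cons]
      simp [String.append_assoc]
    · simp only [Bool.not_eq_true] at ha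
      simp only [ha, Bool.false_eq_true, if_false]
      norm_num only
      rw [ih, join_empty_cons]
      simp [String.append_assoc]
  case case4 code rest hne ih =>
    have hshort : (PySem.Str.startswith (PySem.Str.strip ((PySem.List.pyGet? rest 0).getD "")) "path()" &&
        PySem.Str.startswith (PySem.Str.strip ((PySem.List.pyGet? rest 1).getD "")) "set({)") = false := by
      rcases rest with _ | ⟨a, _ | ⟨b, t⟩⟩
      · decide
      ·
        have g1 : PySem.List.pyGet? [a] (1 : Int) = none := by
          simpa using PySem.List.pyGet?_natCast (xs := [a]) (n := 1)
        rw [g1, Option.getD_none,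
          show PySem.Str.startswith (PySem.Str.strip "") "set({)" = false from by decide,
          Bool.and_false]
      · exact (hne a b t rfl).elim
    have hB : fixGo (code :: rest) = (code ++ "\n") :: fixGo rest := by
      rcases rest with _ | ⟨a, _ | ⟨b, t⟩⟩
      · simp [fixGo]
      · simp [fixGo]
      · exact (hne a b t rfl).elim
    rw [fixA_go, hB]
    by_cases ha : PySem.Str.startswith code "branch" = true
    · simp only [ha, if_true, hshort, Bool.false_eq_true, if_false]
      norm_num only
      rw [ih, join_empty_cons]
      simp [String.append_assoc]
    · simp only [Bool.not_eq_true] at ha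
      simp only [ha, Bool.false_eq_true, if_false]
      norm_num only
      rw [ih, join_empty_cons]
      simp [String.append_assoc]

-- ==== B-side: the staged masks reduce to fixGo ====

-- head-condition of the match mask
def mHead (a : String) (rest : List String) : Bool :=
  PySem.Str.startswith a "branch"
    && PySem.Str.startswith (PySem.Str.strip (rest.getD 0 "")) "path()"
    && PySem.Str.startswith (PySem.Str.strip (rest.getD 1 "")) "set({)"

lemma bMatch_nil : bMatch [] = [] := by simp [bMatch, PySem.List.slice]

lemma bMatch_cons (a : String) (rest : List String) :
    bMatch (a :: rest) = mHead a rest :: bMatch rest := by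
  rcases rest with _ | ⟨c2, _ | ⟨c3, r⟩⟩ <;>
    simp [bMatch, mHead, PySem.List.slice, List.zip]

-- stateful recursion computing the kept mask
def krec : Bool → Bool → List Bool → List String → List Bool
  | _, _, _, [] => []
  | p2, p1, [], _ :: _ => [!(p1 || p2)]
  | p2, p1, b :: bs, _ :: ss => (!(p1 || p2)) :: krec p1 b bs ss

lemma bKept_eq_krec_gen (m : List Bool) (l : List String) (p1 p2 : Bool) :
    (List.zip (p1 :: m) (List.zip (p2 :: p1 :: m) l)).map (fun t => !(t.1 || t.2.1)) =
      krec p2 p1 m l := by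
  induction m generalizing l p1 p2 with
  | nil => cases l <;> simp [krec, List.zip]
  | cons b bs ih =>
    cases l with
    | nil => simp [krec]
    | cons s ss => simpa [krec, List.zip] using ih ss b p1

lemma bKept_eq_krec (m : List Bool) (l : List String) :
    bKept m l = krec false false m l := by
  simpa [bKept] using bKept_eq_krec_gen m l false false

lemma bLines_cons (a : String) (b c : Bool) (l : List String) (m k : List Bool) :
    bLines (a :: l) (b :: m) (c :: k) =
      ((if c then [a ++ "\n"] else []) ++ (if b then ["path({)" ++ ";//" ++ "\n"] else [])) ++
        bLines l m k := by
  simp [bLines, List.zip]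

lemma staged_eq (l : List String) :
    bLines l (bMatch l) (krec false false (bMatch l) l) = fixGo l := by
  induction l using fixGo.induct
  case case1 => simp [bMatch_nil, bLines, krec, fixGo]
  case case2 code c2 c3 rest hc ih =>
    have hc' := hc
    simp only [Bool.and_eq_true] at hc'
    obtain ⟨⟨ha, hb⟩, hc3⟩ := hc'
    have hb2 : PySem.Str.startswith c2 "branch" = false :=
      not_branch_of_strip c2 "path()" 'p' (by decide) (by decide) hb
    have hb3 : PySem.Str.startswith c3 "branch" = false :=
      not_branch_of_strip c3 "set({)" 's' (by decide) (by decide) hc3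
    have hg0 : (c2 :: c3 :: rest).getD 0 "" = c2 := rfl
    have hg1 : (c2 :: c3 :: rest).getD 1 "" = c3 := rfl
    have hm0 : mHead code (c2 :: c3 :: rest) = true := by
      unfold mHead; rw [hg0, hg1, ha, hb, hc3]; rfl
    have hm1 : mHead c2 (c3 :: rest) = false := by
      unfold mHead; rw [hb2, Bool.false_and, Bool.false_and]
    have hm2 : mHead c3 rest = false := by
      unfold mHead; rw [hb3, Bool.false_and, Bool.false_and]
    rw [bMatch_cons, bMatch_cons, bMatch_cons, hm0, hm1, hm2]
    simp only [krec, Bool.or_self, Bool.not_false, Bool.or_true, Bool.not_true]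
    rw [bLines_cons, bLines_cons, bLines_cons, fixGo]
    simp only [hc, if_true]
    simp [ih]
  case case3 code c2 c3 rest hc ih =>
    have hm0 : mHead code (c2 :: c3 :: rest) = false := by
      simpa [mHead] using hc
    rw [bMatch_cons, hm0]
    cases hM : bMatch (c2 :: c3 :: rest) with
    | nil => rw [bMatch_cons] at hM; cases hM
    | cons b bs =>
      simp only [krec, Bool.or_self, Bool.not_false]
      rw [bLines_cons, fixGo]
      simp only [hc, Bool.false_eq_true, if_false]
      rw [hM] at ih
      simp only [krec, Bool.or_self, Bool.not_false] at ih
      simp [ih]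
  case case4 code rest hne ih =>
    have hm0 : mHead code rest = false := by
      rcases rest with _ | ⟨a, _ | ⟨b, t⟩⟩
      · unfold mHead
        rw [show ([] : List String).getD 1 "" = "" from rfl,
          show PySem.Str.startswith (PySem.Str.strip "") "set({)" = false from by decide,
          Bool.and_false]
      · unfold mHead
        rw [show ([a] : List String).getD 1 "" = "" from rfl,
          show PySem.Str.startswith (PySem.Str.strip "") "set({)" = false from by decide,
          Bool.and_false]
      · exact (hne a b t rfl).elim
    have hG : fixGo (code :: rest) = (code ++ "\n") :: fixGo rest := by
      rcases rest with _ | ⟨a, _ | ⟨b, t⟩⟩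
      · simp [fixGo]
      · simp [fixGo]
      · exact (hne a b t rfl).elim
    rw [bMatch_cons, hm0, hG]
    cases hM : bMatch rest with
    | nil =>
      have hrest : rest = [] := by
        cases rest with
        | nil => rfl
        | cons x xs => rw [bMatch_cons] at hM; cases hM
      subst hrest
      simp [krec, bLines, fixGo]
    | cons b bs =>
      cases rest with
      | nil => rw [bMatch_nil] at hM; cases hM
      | cons x xs =>
        simp only [krec, Bool.or_self, Bool.not_false]
        rw [bLines_cons]
        rw [hM] at ih
        simp only [krec, Bool.or_self, Bool.not_false] at ih
        simp [ih]

lemma alt_eq (input : String) :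
    fix_VFC_paths_py_alt input =
      PySem.Str.join "" (fixGo ((PySem.Str.split? input "\n").getD [])) := by
  unfold fix_VFC_paths_py_alt
  rw [bKept_eq_krec, staged_eq]

-- ===== VERDICT (by name: the statement is the Claim_ definition above) =====
theorem fix_VFC_paths_py_spec : Claim_equal_fix_VFC_paths_py := by
  intro s _ _
  unfold Spec_fix_VFC_paths_py fix_VFC_paths_py
  rw [go_eq, String.empty_append, alt_eq]
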